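-- pv_equiv track=rewrite | github.com/Alejito21/Programacion-1-JAVA | py/22. Imprimir Patron Alternador.py | generar_patron
-- ===== SOURCE A (Python) =====
-- def generar_patron(valor):
--     alternador = True
--     dibujo = ""  # Aquí acumularemos todas las filas
--     for i in range(valor, 0, -1):
--         fila = ""
--         for j in range(i):
--             if alternador:
--                 fila += "#"
--             else:
--                 fila += "*"
--             alternador = not alternador
--         dibujo += fila + "\n"  # Añadimos la fila completa al dibujo y pasamos a la siguiente línea
--         if i%2==0:
--              alternador= not alternador   # Reiniciamos el alternador para que cada fila comience igual
--     return dibujo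
-- ===== SOURCE B (Python) =====
-- def generar_patron(valor):
--     rows = []
--     for r in range(valor):
--         length = valor - r
--         pair = "#*" if r % 2 == 0 else "*#"
--         rows.append((pair * ((length + 1) // 2))[:length])
--     return "".join(row + "\n" for row in rows)
-- ===== Notes on version B (the rewrite author's own statement) =====
-- stated objective: simpler
-- what changed: B removes A's mutable alternador threaded across rows and the even-row reset branch: each row's start symbol is read directly off the row index's parity, and the row is built by tiling a two-char pair and slicing to length (then one join) instead of a char-by-char toggle loop with += concatenation.
import Mathlib
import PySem

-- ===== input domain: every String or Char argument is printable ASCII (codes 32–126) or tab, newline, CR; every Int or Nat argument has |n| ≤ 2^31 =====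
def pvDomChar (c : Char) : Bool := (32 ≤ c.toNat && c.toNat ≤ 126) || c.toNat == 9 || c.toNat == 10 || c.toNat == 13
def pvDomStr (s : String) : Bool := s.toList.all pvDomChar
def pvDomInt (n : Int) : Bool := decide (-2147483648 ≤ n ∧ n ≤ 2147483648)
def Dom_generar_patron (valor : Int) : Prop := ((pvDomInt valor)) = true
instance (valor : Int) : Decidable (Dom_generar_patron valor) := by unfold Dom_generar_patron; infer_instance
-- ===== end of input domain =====

-- B drops A's threaded `alternador` state and its even-row reset branch: each row's
-- start symbol is determined directly by the row index's parity (simpler decomposition).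

-- ===== PORT A =====
-- Literal port of A: outer countdown loop threading (alternador, dibujo),
-- inner loop appending one char and toggling alternador, then the i%2==0 reset.
def generar_patron (valor : Int) : String :=
  String.ofList ((PySem.List.pyRange valor 0 (-1)).foldl
    (fun (st : Bool × List Char) (i : Int) =>
      let inner := (PySem.List.pyRange 0 i 1).foldl
        (fun (st2 : List Char × Bool) (_j : Int) =>
          (st2.1 ++ [if st2.2 then '#' else '*'], !st2.2))
        ([], st.1)
      let alternador := inner.2
      let dibujo := st.2 ++ inner.1 ++ ['\n']
      let alternador := if PySem.Int.mod i 2 == 0 then !alternador else alternador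
      (alternador, dibujo))
    (true, ([] : List Char))).2

-- ===== PORT B =====
-- Literal port of B: per-row, pick the 2-char pair by r's parity, tile it and cut to length.
def generar_patron_alt (valor : Int) : String :=
  String.ofList (((((PySem.List.pyRange 0 valor 1).map (fun r =>
    let len := (valor - r).toNat
    let pair := if PySem.Int.mod r 2 == 0 then ['#', '*'] else ['*', '#']
    ((List.replicate ((len + 1) / 2) pair).flatten).take len))).map
      (fun row => row ++ ['\n'])).flatten)

-- ===== PRECONDITION & SPEC =====
def Spec_generar_patron (valor : Int) (out : String) : Prop := out = generar_patron_alt valor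
instance (valor : Int) (out : String) : Decidable (Spec_generar_patron valor out) := by unfold Spec_generar_patron; infer_instance

-- ===== CLAIM (what is proved, stated in full; the proofs are below) =====
def Claim_equal_generar_patron : Prop := ∀ (valor : Int), Dom_generar_patron valor → Spec_generar_patron valor (generar_patron valor)

-- ===== LEMMAS AND PROOFS =====

/-- One alternating row of length `n` starting with '#' iff `a`. -/
def rowChars (a : Bool) : Nat → List Char
  | 0 => []
  | n + 1 => (if a then '#' else '*') :: rowChars (!a) n

/-- The whole picture: rows of lengths n, n-1, …, 1, starting parity alternating. -/
def canon : Nat → Bool → List Char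
  | 0, _ => []
  | n + 1, a => rowChars a (n + 1) ++ ['\n'] ++ canon n (!a)

lemma rowChars_two (a : Bool) (n : Nat) :
    rowChars a (n + 2) = (if a then '#' else '*') :: (if a then '*' else '#') :: rowChars a n := by
  cases a <;> simp [rowChars]

/-- A's inner loop: it only counts steps, producing one alternating row and the flipped parity. -/
lemma innerA (l : List Int) : ∀ (acc : List Char) (a : Bool),
    l.foldl (fun (st2 : List Char × Bool) (_j : Int) =>
      (st2.1 ++ [if st2.2 then '#' else '*'], !st2.2)) (acc, a)
    = (acc ++ rowChars a l.length, if l.length % 2 = 0 then a else !a) := by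
  induction l with
  | nil => intro acc a; simp [rowChars]
  | cons x xs ih =>
    intro acc a
    simp only [List.foldl_cons, List.length_cons, ih, Prod.mk.injEq]
    constructor
    · simp [rowChars]
    · rcases Nat.even_or_odd xs.length with h | h
      · have h0 : xs.length % 2 = 0 := Nat.even_iff.mp h
        have h1 : (xs.length + 1) % 2 = 1 := by omega
        simp [h0, h1]
      · have h0 : xs.length % 2 = 1 := Nat.odd_iff.mp h
        have h1 : (xs.length + 1) % 2 = 0 := by omega
        simp [h0, h1]

/-- B's row construction: tiling the parity pair and cutting to length is the alternating row. -/
lemma tileRow (a : Bool) : ∀ n : Nat,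
    ((List.replicate ((n + 1) / 2) [(if a then '#' else '*'), (if a then '*' else '#')]).flatten).take n
    = rowChars a n := by
  intro n
  induction n using Nat.strong_induction_on with
  | _ n ih =>
    match n with
    | 0 => simp [rowChars]
    | 1 => cases a <;> simp [rowChars]
    | (m + 2) =>
      have hdiv : (m + 2 + 1) / 2 = (m + 1) / 2 + 1 := by omega
      rw [hdiv, List.replicate_succ, List.flatten_cons, rowChars_two]
      simp only [List.cons_append, List.nil_append, List.take_succ_cons]
      rw [ih m (by omega)]

/-- B's whole output from row index `r0` with `n` rows left equals `canon n` at `r0`'s parity. -/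
lemma Bside : ∀ (n : Nat) (v r0 : Int), 0 ≤ r0 → v = r0 + n →
    (((PySem.List.pyRange r0 v 1).map (fun r =>
        let len := (v - r).toNat
        let pair := if PySem.Int.mod r 2 == 0 then ['#', '*'] else ['*', '#']
        ((List.replicate ((len + 1) / 2) pair).flatten).take len)).map
      (fun row => row ++ ['\n'])).flatten
    = canon n (PySem.Int.mod r0 2 == 0) := by
  intro n
  induction n with
  | zero =>
    intro v r0 _ hv
    rw [PySem.List.pyRange_one_eq_nil (by omega)]
    simp [canon]
  | succ m ih =>
    intro v r0 h0 hv
    rw [PySem.List.pyRange_one_cons (by omega)]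
    simp only [List.map_cons, List.flatten_cons]
    have hm : PySem.Int.mod r0 2 = r0 % 2 := PySem.Int.mod_eq_emod_of_pos (by omega)
    have hm1 : PySem.Int.mod (r0 + 1) 2 = (r0 + 1) % 2 := PySem.Int.mod_eq_emod_of_pos (by omega)
    have hlen : (v - r0).toNat = m + 1 := by omega
    have hpair : (if PySem.Int.mod r0 2 == 0 then ['#', '*'] else ['*', '#'])
        = [(if (PySem.Int.mod r0 2 == 0) then '#' else '*'),
           (if (PySem.Int.mod r0 2 == 0) then '*' else '#')] := by
      cases h : (PySem.Int.mod r0 2 == 0) <;> simp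
    rw [hlen, hpair, tileRow (PySem.Int.mod r0 2 == 0) (m + 1),
        ih v (r0 + 1) (by omega) (by omega)]
    have hflip : (PySem.Int.mod (r0 + 1) 2 == 0) = !(PySem.Int.mod r0 2 == 0) := by
      rw [hm, hm1]
      have h2 : 0 ≤ r0 % 2 ∧ r0 % 2 < 2 := ⟨Int.emod_nonneg _ (by omega), Int.emod_lt_of_pos _ (by omega)⟩
      rcases (by omega : r0 % 2 = 0 ∨ r0 % 2 = 1) with h | h <;>
        · have h1 : (r0 + 1) % 2 = 1 - r0 % 2 := by omega
          simp [h1, h]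
    rw [hflip]
    simp [canon]

/-- A's outer loop from `i = n` down, parity `a`, accumulator `acc`. -/
lemma Aside : ∀ (n : Nat) (i : Int) (a : Bool) (acc : List Char), i = n →
    ((PySem.List.pyRange i 0 (-1)).foldl
      (fun (st : Bool × List Char) (i : Int) =>
        let inner := (PySem.List.pyRange 0 i 1).foldl
          (fun (st2 : List Char × Bool) (_j : Int) =>
            (st2.1 ++ [if st2.2 then '#' else '*'], !st2.2))
          ([], st.1)
        let alternador := inner.2
        let dibujo := st.2 ++ inner.1 ++ ['\n']
        let alternador := if PySem.Int.mod i 2 == 0 then !alternador else alternador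
        (alternador, dibujo))
      (a, acc)).2
    = acc ++ canon n a := by
  intro n
  induction n with
  | zero =>
    intro i a acc hi
    subst hi
    rw [PySem.List.pyRange_neg_one_eq_nil (by omega)]
    simp [canon]
  | succ m ih =>
    intro i a acc hi
    subst hi
    rw [PySem.List.pyRange_neg_one_cons (by omega)]
    simp only [List.foldl_cons]
    have hlen : (PySem.List.pyRange 0 ((m + 1 : Nat) : Int) 1).length = m + 1 := by
      rw [PySem.List.length_pyRange_one]; omega
    rw [innerA, hlen]
    have hm : PySem.Int.mod ((m + 1 : Nat) : Int) 2 = ((m + 1 : Nat) : Int) % 2 :=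
      PySem.Int.mod_eq_emod_of_pos (by omega)
    have hflip : (if PySem.Int.mod ((m + 1 : Nat) : Int) 2 == 0 then
          !(if (m + 1) % 2 = 0 then a else !a)
        else (if (m + 1) % 2 = 0 then a else !a)) = !a := by
      rcases Nat.even_or_odd (m + 1) with h | h
      · have h0 : (m + 1) % 2 = 0 := Nat.even_iff.mp h
        have h0' : ((m + 1 : Nat) : Int) % 2 = 0 := by omega
        simp [h0]; omega
      · have h0 : (m + 1) % 2 = 1 := Nat.odd_iff.mp h
        have h0' : ((m + 1 : Nat) : Int) % 2 = 1 := by omega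
        simp [h0]; omega
    simp only [hflip]
    rw [ih (((m + 1 : Nat) : Int) - 1) (!a) _ (by omega)]
    simp [canon, List.append_assoc]

lemma A_eq_canon (valor : Int) : generar_patron valor = String.ofList (canon valor.toNat true) := by
  unfold generar_patron
  by_cases h : valor ≤ 0
  · rw [PySem.List.pyRange_neg_one_eq_nil (by omega)]
    have : valor.toNat = 0 := by omega
    simp [this, canon]
  · rw [Aside valor.toNat valor true [] (by omega)]
    simp

lemma B_eq_canon (valor : Int) : generar_patron_alt valor = String.ofList (canon valor.toNat true) := by
  unfold generar_patron_alt
  by_cases h : valor ≤ 0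
  · rw [PySem.List.pyRange_one_eq_nil (by omega)]
    have : valor.toNat = 0 := by omega
    simp [this, canon]
  · have hb : (PySem.Int.mod 0 2 == 0) = true := by decide
    rw [Bside valor.toNat valor 0 (by omega) (by omega), hb]

-- ===== VERDICT (by name: the statement is the Claim_ definition above) =====
theorem generar_patron_spec : Claim_equal_generar_patron := by
  intro valor _
  unfold Spec_generar_patron
  rw [A_eq_canon, B_eq_canon]
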